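-- pv_equiv track=rewrite | github.com/Traceytrace/YAMHC.github.io | utils.py | find_weapon_name_by_alternate_name
-- ===== SOURCE A (Python) =====
-- def find_weapon_name_by_alternate_name(charm_db, given_name):
--     for item in charm_db.values():
--         if item['tree'] == given_name:
--             return item['name']
--     for item in charm_db.values():
--         if item['name'] == given_name:
--             return item['tree']
--     return None
-- ===== SOURCE B (Python) =====
-- def find_weapon_name_by_alternate_name(charm_db, given_name):
--     candidate = None
--     for item in charm_db.values():
--         if item['tree'] == given_name:
--             return item['name']
--         if candidate is None and item.get('name') == given_name:
--             candidate = item['tree']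
--     return candidate
-- ===== Notes on version B (the rewrite author's own statement) =====
-- stated objective: alternative
-- what changed: Replaces A's two sequential scans over the values with a single scan that returns immediately on a tree match and remembers the first name match's tree as a fallback candidate returned at the end.
import Mathlib
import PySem

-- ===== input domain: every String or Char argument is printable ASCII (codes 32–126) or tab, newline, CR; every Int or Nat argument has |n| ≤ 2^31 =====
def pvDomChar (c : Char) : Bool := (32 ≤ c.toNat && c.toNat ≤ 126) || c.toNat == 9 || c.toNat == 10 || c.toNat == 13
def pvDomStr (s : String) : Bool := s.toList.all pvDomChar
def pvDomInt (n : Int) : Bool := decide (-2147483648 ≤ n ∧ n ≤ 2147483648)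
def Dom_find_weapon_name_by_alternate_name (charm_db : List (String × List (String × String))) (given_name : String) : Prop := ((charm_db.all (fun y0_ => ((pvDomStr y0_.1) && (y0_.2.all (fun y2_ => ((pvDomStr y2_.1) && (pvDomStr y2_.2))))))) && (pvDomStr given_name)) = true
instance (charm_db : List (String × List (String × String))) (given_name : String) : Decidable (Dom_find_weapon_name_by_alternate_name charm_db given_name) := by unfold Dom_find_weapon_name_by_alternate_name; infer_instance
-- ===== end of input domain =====

-- B replaces A's two sequential scans with a single scan keeping a fallback candidate (alternative decomposition, same cost).
-- Inputs on which Python A raises KeyError (a missing 'tree'/'name' key reached before a match) are excluded by Pre_.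

-- item[k] on an inner dict (Python raises KeyError where this is none; such inputs are outside Pre_)
def pvItemGet (item : List (String × String)) (k : String) : Option String :=
  (PySem.Dict.ofList item).get? k

-- ===== PORT A =====
-- first loop: `for item in …: if item['tree'] == given_name: return item['name']` ; some r = the loop returned r
def fwnA_loop1 (g : String) : List (List (String × String)) → Option (Option String)
  | [] => none
  | item :: rest =>
    if pvItemGet item "tree" = some g then some (pvItemGet item "name")
    else fwnA_loop1 g rest

-- second loop + final `return None`
def fwnA_loop2 (g : String) : List (List (String × String)) → Option String
  | [] => none
  | item :: rest =>
    if pvItemGet item "name" = some g then pvItemGet item "tree"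
    else fwnA_loop2 g rest

def find_weapon_name_by_alternate_name (charm_db : List (String × List (String × String))) (given_name : String) : Option String :=
  let vs := (PySem.Dict.ofList charm_db).values
  match fwnA_loop1 given_name vs with
  | some r => r
  | none => fwnA_loop2 given_name vs

-- ===== PORT B =====
-- single loop with the fallback candidate
def fwnB_go (g : String) : List (List (String × String)) → Option String → Option String
  | [], cand => cand
  | item :: rest, cand =>
    if pvItemGet item "tree" = some g then pvItemGet item "name"
    else fwnB_go g rest
      (if cand = none ∧ pvItemGet item "name" = some g then pvItemGet item "tree" else cand)

def find_weapon_name_by_alternate_name_alt (charm_db : List (String × List (String × String))) (given_name : String) : Option String :=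
  fwnB_go given_name ((PySem.Dict.ofList charm_db).values) none

-- ===== PRECONDITION & SPEC =====
-- Pre_ = exactly the inputs on which Python A returns (no KeyError): every item reached by the first
-- loop before a tree match has a 'tree' key, the returning item has a 'name' key, and (when no tree
-- matches) every item reached by the second loop before a name match has a 'name' key.
def Pre_find_weapon_name_by_alternate_name (charm_db : List (String × List (String × String))) (given_name : String) : Prop :=
  let vs := (PySem.Dict.ofList charm_db).values
  (∀ i, (h : i < vs.length) →
      (∀ j, (hj : j < vs.length) → j < i → pvItemGet vs[j] "tree" ≠ some given_name) →
      (pvItemGet vs[i] "tree").isSome)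
  ∧ (∀ i, (h : i < vs.length) →
      (pvItemGet vs[i] "tree" = some given_name ∧
        ∀ j, (hj : j < vs.length) → j < i → pvItemGet vs[j] "tree" ≠ some given_name) →
      (pvItemGet vs[i] "name").isSome)
  ∧ ((∀ v ∈ vs, pvItemGet v "tree" ≠ some given_name) →
      ∀ i, (h : i < vs.length) →
      (∀ j, (hj : j < vs.length) → j < i → pvItemGet vs[j] "name" ≠ some given_name) →
      (pvItemGet vs[i] "name").isSome)
instance (charm_db : List (String × List (String × String))) (given_name : String) : Decidable (Pre_find_weapon_name_by_alternate_name charm_db given_name) := by unfold Pre_find_weapon_name_by_alternate_name; infer_instance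

def pvWitness_find_weapon_name_by_alternate_name : (List (String × List (String × String))) × String :=
  ([("a", [("tree", "t"), ("name", "n")]), ("b", [("tree", "hammer"), ("name", "m")])], "hammer")

def Spec_find_weapon_name_by_alternate_name (charm_db : List (String × List (String × String))) (given_name : String) (out : Option String) : Prop := out = find_weapon_name_by_alternate_name_alt charm_db given_name
instance (charm_db : List (String × List (String × String))) (given_name : String) (out : Option String) : Decidable (Spec_find_weapon_name_by_alternate_name charm_db given_name out) := by unfold Spec_find_weapon_name_by_alternate_name; infer_instance

-- ===== CLAIM (what is proved, stated in full; the proofs are below) =====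
def Claim_equal_find_weapon_name_by_alternate_name : Prop := ∀ (charm_db : List (String × List (String × String))) (given_name : String), Dom_find_weapon_name_by_alternate_name charm_db given_name → Pre_find_weapon_name_by_alternate_name charm_db given_name → Spec_find_weapon_name_by_alternate_name charm_db given_name (find_weapon_name_by_alternate_name charm_db given_name)

-- ===== LEMMAS AND PROOFS =====

-- Once the candidate is set, B's loop ignores name matches: it returns on a tree match, else the candidate.
lemma fwnB_go_some (g : String) (L : List (List (String × String))) (c : String) :
    fwnB_go g L (some c) = match fwnA_loop1 g L with | some r => r | none => some c := by
  induction L with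
  | nil => rfl
  | cons item rest ih =>
    by_cases h : pvItemGet item "tree" = some g
    · simp [fwnB_go, fwnA_loop1, h]
    · simp [fwnB_go, fwnA_loop1, h, ih]

-- Main invariant: if every item preceding the first tree match has a 'tree' key, B's single scan
-- computes A's two-scan result.
lemma fwnB_main (g : String) (L : List (List (String × String)))
    (h1 : ∀ i, (h : i < L.length) →
        (∀ j, (hj : j < L.length) → j < i → pvItemGet L[j] "tree" ≠ some g) →
        (pvItemGet L[i] "tree").isSome) :
    fwnB_go g L none = match fwnA_loop1 g L with | some r => r | none => fwnA_loop2 g L := by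
  induction L with
  | nil => rfl
  | cons item rest ih =>
    by_cases ht : pvItemGet item "tree" = some g
    · simp [fwnB_go, fwnA_loop1, ht]
    · have hhead : (pvItemGet item "tree").isSome := by
        have := h1 0 (by simp) (by intro j hj hj0; omega)
        simpa using this
      by_cases hn : pvItemGet item "name" = some g
      · -- candidate gets set to item['tree'] = some t
        obtain ⟨t, htv⟩ := Option.isSome_iff_exists.mp hhead
        have htne : t ≠ g := fun he => ht (he ▸ htv)
        have : fwnB_go g (item :: rest) none = fwnB_go g rest (some t) := by
          simp [fwnB_go, hn, htv, htne]
        rw [this, fwnB_go_some]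
        simp [fwnA_loop1, fwnA_loop2, hn, htv, htne]
      · have htail : ∀ i, (h : i < rest.length) →
            (∀ j, (hj : j < rest.length) → j < i → pvItemGet rest[j] "tree" ≠ some g) →
            (pvItemGet rest[i] "tree").isSome := by
          intro i h hb
          have := h1 (i + 1) (by simpa using Nat.succ_lt_succ h) ?_
          · simpa using this
          · intro j hj hji
            match j, hj with
            | 0, _ => simpa using ht
            | (k + 1), hj =>
              have hk : k < rest.length := by simpa using Nat.lt_of_succ_lt_succ hj
              have := hb k hk (by omega)
              simpa using this
        simp [fwnB_go, fwnA_loop1, fwnA_loop2, ht, hn, ih htail]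

-- ===== VERDICT (by name: the statement is the Claim_ definition above) =====
theorem find_weapon_name_by_alternate_name_spec : Claim_equal_find_weapon_name_by_alternate_name := by
  intro charm_db given_name _ hpre
  unfold Spec_find_weapon_name_by_alternate_name
  unfold Pre_find_weapon_name_by_alternate_name at hpre
  unfold find_weapon_name_by_alternate_name find_weapon_name_by_alternate_name_alt
  exact (fwnB_main given_name _ hpre.1).symm
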